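-- pv_equiv track=rewrite | github.com/ljcamargo/tachiwin_paddleocrvl_finetuning | generator_llm.py | select_font_deterministic
-- ===== SOURCE A (Python) =====
-- def select_font_deterministic(seed, index, fonts):
--     if not fonts:
--         return None
--
--     # Group by family to equalise probability
--     # Family is defined as the first part of the name before '-'
--     families_map = {}
--     for f in fonts:
--         fam = f.split('-')[0]
--         if fam not in families_map:
--             families_map[fam] = []
--         families_map[fam].append(f)
--
--     sorted_families = sorted(families_map.keys())
--
--     if not sorted_families:
--         return None
--
--     # Select Family
--     # Use distinct mixing constants to avoid correlation with other params
--     h_family = (seed + index * 0x9E3779B9) & 0xFFFFFFFF # Golden Ratio constant for mixing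
--     family_idx = h_family % len(sorted_families)
--     selected_family = sorted_families[family_idx]
--
--     # Select Variant
--     variants = families_map[selected_family]
--     h_variant = (seed + index * 0x85EBCA6B) & 0xFFFFFFFF # Another mix
--     variant_idx = h_variant % len(variants)
--
--     return variants[variant_idx]
-- ===== SOURCE B (Python) =====
-- def select_font_deterministic(seed, index, fonts):
--     if not fonts:
--         return None
--
--     # Distinct families, sorted, without building a family->variants map
--     sorted_families = sorted(set(f.split('-')[0] for f in fonts))
--
--     h_family = (seed + index * 0x9E3779B9) & 0xFFFFFFFF
--     selected_family = sorted_families[h_family % len(sorted_families)]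
--
--     # Only the selected family's variants, in original order
--     variants = [f for f in fonts if f.split('-')[0] == selected_family]
--     h_variant = (seed + index * 0x85EBCA6B) & 0xFFFFFFFF
--     return variants[h_variant % len(variants)]
-- ===== Notes on version B (the rewrite author's own statement) =====
-- stated objective: simpler
-- what changed: B drops the up-front family->variants dict: it sorts the distinct family prefixes directly (sorted(set(...))) and then collects only the selected family's variants with a single order-preserving filter pass.
import Mathlib
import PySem

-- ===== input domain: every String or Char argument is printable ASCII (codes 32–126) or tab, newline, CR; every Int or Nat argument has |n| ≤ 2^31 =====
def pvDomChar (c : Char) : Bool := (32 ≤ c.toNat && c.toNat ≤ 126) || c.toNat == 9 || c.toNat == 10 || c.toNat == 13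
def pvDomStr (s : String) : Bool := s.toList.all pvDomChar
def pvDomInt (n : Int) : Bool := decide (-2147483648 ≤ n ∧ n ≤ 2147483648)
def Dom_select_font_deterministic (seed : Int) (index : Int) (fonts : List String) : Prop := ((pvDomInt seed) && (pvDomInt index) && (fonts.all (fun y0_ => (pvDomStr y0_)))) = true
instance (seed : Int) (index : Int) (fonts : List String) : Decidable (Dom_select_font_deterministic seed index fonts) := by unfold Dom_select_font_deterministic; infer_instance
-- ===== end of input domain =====

-- B replaces A's up-front family→variants dict by sorted distinct families plus one
-- targeted filter pass for the selected family (objective: simpler decomposition).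

-- shared helper: f.split('-')[0]  (split with a nonempty separator always yields a
-- nonempty list, so the Python [0] is the head and never raises)
def pvFam (f : String) : String := ((PySem.Str.split? f "-").getD []).headD ""

-- ===== PORT A =====
def select_font_deterministic (seed : Int) (index : Int) (fonts : List String) : Option String :=
  if fonts = [] then none
  else
    let families_map : PySem.Dict String (List String) :=
      fonts.foldl (fun d f =>
        let fam := pvFam f
        let d' := if d.contains fam then d else d.insert fam []
        d'.modify fam [] (fun v => v ++ [f])) PySem.Dict.empty
    let sorted_families := PySem.List.sorted families_map.keys (fun x => x) false
    if sorted_families = [] then none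
    else
      let h_family := PySem.Int.band (seed + index * 0x9E3779B9) 0xFFFFFFFF
      let family_idx := PySem.Int.mod h_family (sorted_families.length : Int)
      -- index provably in range (0 ≤ mod < length), so Python never raises here
      let selected_family := (PySem.List.pyGet? sorted_families family_idx).getD ""
      -- selected_family is a key of the dict, so the Python lookup never raises
      let variants := families_map.getD selected_family []
      let h_variant := PySem.Int.band (seed + index * 0x85EBCA6B) 0xFFFFFFFF
      let variant_idx := PySem.Int.mod h_variant (variants.length : Int)
      PySem.List.pyGet? variants variant_idx

-- ===== PORT B =====
def select_font_deterministic_alt (seed : Int) (index : Int) (fonts : List String) : Option String :=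
  if fonts = [] then none
  else
    let sorted_families := PySem.List.sorted (PySem.Set.ofList (fonts.map pvFam)) (fun x => x) false
    let h_family := PySem.Int.band (seed + index * 0x9E3779B9) 0xFFFFFFFF
    -- index provably in range (0 ≤ mod < length), so Python never raises here
    let selected_family := (PySem.List.pyGet? sorted_families (PySem.Int.mod h_family (sorted_families.length : Int))).getD ""
    let variants := fonts.filter (fun f => pvFam f == selected_family)
    let h_variant := PySem.Int.band (seed + index * 0x85EBCA6B) 0xFFFFFFFF
    PySem.List.pyGet? variants (PySem.Int.mod h_variant (variants.length : Int))

-- ===== PRECONDITION & SPEC =====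
def Spec_select_font_deterministic (seed : Int) (index : Int) (fonts : List String) (out : Option String) : Prop := out = select_font_deterministic_alt seed index fonts
instance (seed : Int) (index : Int) (fonts : List String) (out : Option String) : Decidable (Spec_select_font_deterministic seed index fonts out) := by unfold Spec_select_font_deterministic; infer_instance

-- ===== CLAIM (what is proved, stated in full; the proofs are below) =====
def Claim_equal_select_font_deterministic : Prop := ∀ (seed : Int) (index : Int) (fonts : List String), Dom_select_font_deterministic seed index fonts → Spec_select_font_deterministic seed index fonts (select_font_deterministic seed index fonts)

-- ===== LEMMAS AND PROOFS =====

-- A's loop body equals a plain modify-with-append (the contains/insert guard is redundant)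
theorem pv_step_eq (d : PySem.Dict String (List String)) (f : String) :
    (let fam := pvFam f
     let d' := if d.contains fam then d else d.insert fam []
     d'.modify fam [] (fun v => v ++ [f])) = d.modify (pvFam f) [] (fun v => v ++ [f]) := by
  by_cases hc : d.contains (pvFam f) = true
  · simp [hc]
  · simp only [Bool.not_eq_true] at hc
    simp only [hc, Bool.false_eq_true, ite_false]
    simp only [PySem.Dict.modify, PySem.Dict.getD_insert_self, PySem.Dict.insert_insert_self,
      PySem.Dict.getD_of_not_contains (h := hc)]

theorem pv_fold_eq (fonts : List String) :
    fonts.foldl (fun d f =>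
        let fam := pvFam f
        let d' := if d.contains fam then d else d.insert fam []
        d'.modify fam [] (fun v => v ++ [f])) PySem.Dict.empty
      = fonts.foldl (fun d f => d.modify (pvFam f) [] (fun v => v ++ [f])) PySem.Dict.empty := by
  exact PySem.List.foldl_congr_mem _ _ _ _ (fun d f _ => pv_step_eq d f)

theorem pv_keys_eq (fonts : List String) :
    (fonts.foldl (fun d f => d.modify (pvFam f) [] (fun v => v ++ [f]))
        (PySem.Dict.empty : PySem.Dict String (List String))).keys
      = PySem.Set.ofList (fonts.map pvFam) := by
  exact PySem.Dict.keys_foldl_modify_key fonts pvFam [] (fun _ f => fun v => v ++ [f]) PySem.Dict.empty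

theorem pv_getD_eq (fonts : List String) (k : String) :
    (fonts.foldl (fun d f => d.modify (pvFam f) [] (fun v => v ++ [f]))
        (PySem.Dict.empty : PySem.Dict String (List String))).getD k []
      = fonts.filter (fun f => pvFam f == k) := by
  have h := List.foldl_map (f := fun f : String => (pvFam f, f))
      (g := fun (d : PySem.Dict String (List String)) (p : String × String) => d.modify p.1 [] (fun v => v ++ [p.2]))
      (l := fonts) (init := (PySem.Dict.empty : PySem.Dict String (List String)))
  rw [← h, PySem.Dict.getD_foldl_modify_append, List.filter_map, List.map_map]
  simp [Function.comp_def]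

-- ===== VERDICT (by name: the statement is the Claim_ definition above) =====
theorem select_font_deterministic_spec : Claim_equal_select_font_deterministic := by
  intro seed index fonts _
  unfold Spec_select_font_deterministic
  unfold select_font_deterministic select_font_deterministic_alt
  by_cases hf : fonts = []
  · simp [hf]
  · simp only [if_neg hf]
    rw [pv_fold_eq, pv_keys_eq]
    rw [pv_getD_eq]
    set L := PySem.List.sorted (PySem.Set.ofList (fonts.map pvFam)) (fun x => x) false with hL
    rw [if_neg ?hne]
    case hne =>
      rw [hL, PySem.List.sorted_eq_nil_iff]
      intro hnil
      rcases List.exists_mem_of_ne_nil fonts hf with ⟨f, hfmem⟩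
      have : pvFam f ∈ PySem.Set.ofList (fonts.map pvFam) :=
        (PySem.Set.mem_ofList _ _).mpr (List.mem_map_of_mem hfmem)
      simp [hnil] at this
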